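-- pv_equiv track=rewrite | github.com/cloudspurs/androidEclipse | Android/WebContent/RelFix/Analyze/track_reg.py | get_param_seq
-- ===== SOURCE A (Python) =====
-- def get_param_seq(param_str):
--     result = []
--
--     index = 0
--     start_index = 0
--     is_end = True
--     is_ref = False
--     while index < len(param_str):
--         if is_end:
--             start_index = index
--             is_end = False
--
--         if 'L' == param_str[index] and not is_ref:
--             is_ref = True
--             index += 1
--         elif not '[' == param_str[index] and not is_ref:
--             is_end = True
--             result.append(param_str[start_index:index+1])
--             if 'J' == param_str[index] or 'D' == param_str[index]:
--                 result.append(' ')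
--             index += 1
--         elif ';' == param_str[index]:
--             is_end = True
--             is_ref = False
--             result.append(param_str[start_index:index+1])
--             index += 1
--         else:
--             index += 1
--
--     return result
-- ===== SOURCE B (Python) =====
-- def get_param_seq(param_str):
--     result = []
--     n = len(param_str)
--     i = 0
--     while i < n:
--         start = i
--         while i < n and param_str[i] == '[':
--             i += 1
--         if i == n:
--             break
--         c = param_str[i]
--         if c == 'L':
--             while i < n and param_str[i] != ';':
--                 i += 1
--             if i == n:
--                 break
--             result.append(param_str[start:i+1])
--             i += 1
--         else:
--             result.append(param_str[start:i+1])
--             if c == 'J' or c == 'D':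
--                 result.append(' ')
--             i += 1
--     return result
-- ===== Notes on version B (the rewrite author's own statement) =====
-- stated objective: alternative
-- what changed: Replaces A's flag-driven per-character state machine (is_end/is_ref flags, one step per char) by a nested token scanner: an outer loop per token with inner loops that skip the '[' run and scan an L-reference forward to its ';'.
import Mathlib
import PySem

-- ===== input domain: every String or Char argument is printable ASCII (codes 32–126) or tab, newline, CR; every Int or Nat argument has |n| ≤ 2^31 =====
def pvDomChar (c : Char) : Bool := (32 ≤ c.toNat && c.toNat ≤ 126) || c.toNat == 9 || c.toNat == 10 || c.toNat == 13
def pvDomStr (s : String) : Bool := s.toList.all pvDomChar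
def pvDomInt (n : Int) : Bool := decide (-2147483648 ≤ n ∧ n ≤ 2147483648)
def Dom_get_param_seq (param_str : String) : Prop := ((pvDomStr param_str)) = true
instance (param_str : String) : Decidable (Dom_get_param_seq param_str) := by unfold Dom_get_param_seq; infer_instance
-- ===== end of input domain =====

-- B replaces A's flag-driven per-character state machine by a nested token scanner
-- (outer loop per token, inner scans for the '[' run and for the ';' ending an L-reference);
-- same O(n) cost, different decomposition.

-- Python slice cs[a:b]; exact for 0 ≤ a ≤ b (the only slices either program takes).
def pvSlice (cs : List Char) (a b : Nat) : String := String.ofList ((cs.drop a).take (b - a))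

-- ===== PORT A =====
-- literal transliteration of A's while loop; state = (index, start_index, is_end, is_ref, result)
def loopA (cs : List Char) (index start_index : Nat) (is_end is_ref : Bool) (acc : List String) :
    List String :=
  if index < cs.length then
    -- "if is_end: start_index = index; is_end = False"
    let s := if is_end then index else start_index
    let c := cs[index]!
    if c = 'L' ∧ is_ref = false then
      loopA cs (index + 1) s false true acc
    else if ¬ c = '[' ∧ is_ref = false then
      loopA cs (index + 1) s true is_ref
        (acc ++ [pvSlice cs s (index + 1)] ++ (if c = 'J' ∨ c = 'D' then [" "] else []))
    else if c = ';' then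
      loopA cs (index + 1) s true false (acc ++ [pvSlice cs s (index + 1)])
    else
      loopA cs (index + 1) s false is_ref acc
  else acc
termination_by cs.length - index
decreasing_by all_goals omega

def get_param_seq (param_str : String) : List String :=
  loopA param_str.toList 0 0 true false []

-- ===== PORT B =====
-- inner while: skip the run of '['
def skipBr (cs : List Char) (i : Nat) : Nat :=
  if i < cs.length then (if cs[i]! = '[' then skipBr cs (i + 1) else i) else i
termination_by cs.length - i
decreasing_by omega

-- inner while: scan forward to the first ';'
def skipSemi (cs : List Char) (i : Nat) : Nat :=
  if i < cs.length then (if ¬ cs[i]! = ';' then skipSemi cs (i + 1) else i) else i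
termination_by cs.length - i
decreasing_by omega

theorem skipBr_ge (cs : List Char) (i : Nat) : i ≤ skipBr cs i := by
  unfold skipBr
  split
  · split
    · exact le_trans (by omega) (skipBr_ge cs (i + 1))
    · exact le_refl i
  · exact le_refl i
termination_by cs.length - i
decreasing_by omega

theorem skipSemi_ge (cs : List Char) (i : Nat) : i ≤ skipSemi cs i := by
  unfold skipSemi
  split
  · split
    · exact le_trans (by omega) (skipSemi_ge cs (i + 1))
    · exact le_refl i
  · exact le_refl i
termination_by cs.length - i
decreasing_by omega

-- outer loop of B: one iteration per emitted token
def loopB (cs : List Char) (i : Nat) (acc : List String) : List String :=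
  if i < cs.length then
    let start := i
    let j := skipBr cs i
    if j < cs.length then
      let c := cs[j]!
      if c = 'L' then
        let k := skipSemi cs j
        if k < cs.length then
          loopB cs (k + 1) (acc ++ [pvSlice cs start (k + 1)])
        else acc
      else
        loopB cs (j + 1)
          (acc ++ [pvSlice cs start (j + 1)] ++ (if c = 'J' ∨ c = 'D' then [" "] else []))
    else acc
  else acc
termination_by cs.length - i
decreasing_by
  · have h1 := skipBr_ge cs i
    have h2 := skipSemi_ge cs (skipBr cs i)
    omega
  · have h1 := skipBr_ge cs i
    omega

def get_param_seq_alt (param_str : String) : List String :=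
  loopB param_str.toList 0 []

-- ===== PRECONDITION & SPEC =====
def Spec_get_param_seq (param_str : String) (out : List String) : Prop := out = get_param_seq_alt param_str
instance (param_str : String) (out : List String) : Decidable (Spec_get_param_seq param_str out) := by unfold Spec_get_param_seq; infer_instance

-- ===== CLAIM (what is proved, stated in full; the proofs are below) =====
def Claim_equal_get_param_seq : Prop := ∀ (param_str : String), Dom_get_param_seq param_str → Spec_get_param_seq param_str (get_param_seq param_str)

-- ===== LEMMAS AND PROOFS =====

theorem skipBr_stop (cs : List Char) (i : Nat) (h : ¬ cs[i]! = '[') : skipBr cs i = i := by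
  rw [skipBr]
  by_cases hi : i < cs.length
  · rw [getElem!_pos cs i hi] at h
    simp [hi, h]
  · simp [hi]

theorem skipBr_step (cs : List Char) (i : Nat) (hi : i < cs.length) (h : cs[i]! = '[') :
    skipBr cs i = skipBr cs (i + 1) := by
  rw [getElem!_pos cs i hi] at h
  conv_lhs => rw [skipBr]
  simp [hi, h]

theorem skipBr_char (cs : List Char) (i : Nat) (h : skipBr cs i < cs.length) :
    ¬ cs[skipBr cs i]! = '[' := by
  by_cases hi : i < cs.length
  · by_cases hc : cs[i]! = '['
    · rw [skipBr_step cs i hi hc] at h ⊢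
      exact skipBr_char cs (i + 1) h
    · rw [skipBr_stop cs i hc]
      exact hc
  · have he : skipBr cs i = i := by rw [skipBr]; simp [hi]
    rw [he] at h
    omega
termination_by cs.length - i
decreasing_by omega

theorem skipSemi_stop (cs : List Char) (i : Nat) (h : cs[i]! = ';') : skipSemi cs i = i := by
  rw [skipSemi]
  by_cases hi : i < cs.length
  · rw [getElem!_pos cs i hi] at h
    simp [hi, h]
  · simp [hi]

theorem skipSemi_step (cs : List Char) (i : Nat) (hi : i < cs.length) (h : ¬ cs[i]! = ';') :
    skipSemi cs i = skipSemi cs (i + 1) := by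
  rw [getElem!_pos cs i hi] at h
  conv_lhs => rw [skipSemi]
  simp [hi, h]

theorem skipSemi_char (cs : List Char) (i : Nat) (h : skipSemi cs i < cs.length) :
    cs[skipSemi cs i]! = ';' := by
  by_cases hi : i < cs.length
  · by_cases hc : cs[i]! = ';'
    · rw [skipSemi_stop cs i hc]
      exact hc
    · rw [skipSemi_step cs i hi hc] at h ⊢
      exact skipSemi_char cs (i + 1) h
  · have he : skipSemi cs i = i := by rw [skipSemi]; simp [hi]
    rw [he] at h
    omega
termination_by cs.length - i
decreasing_by omega

-- A in bracket-skipping mode (is_end = false, is_ref = false) advances to skipBr's stop point.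
theorem loopA_skipBr (cs : List Char) (i s : Nat) (acc : List String) :
    loopA cs i s false false acc = loopA cs (skipBr cs i) s false false acc := by
  by_cases hi : i < cs.length
  · by_cases hc : cs[i]! = '['
    · rw [skipBr_step cs i hi hc]
      have hstep : loopA cs i s false false acc = loopA cs (i + 1) s false false acc := by
        have hc' : cs[i] = '[' := by rw [← getElem!_pos cs i hi]; exact hc
        conv_lhs => rw [loopA]
        simp [hi, hc']
      rw [hstep]
      exact loopA_skipBr cs (i + 1) s acc
    · rw [skipBr_stop cs i hc]
  · have he : skipBr cs i = i := by rw [skipBr]; simp [hi]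
    rw [he]
termination_by cs.length - i
decreasing_by omega

-- A in reference mode (is_ref = true) advances to the first ';' (skipSemi's stop point).
theorem loopA_skipSemi (cs : List Char) (i s : Nat) (acc : List String) :
    loopA cs i s false true acc = loopA cs (skipSemi cs i) s false true acc := by
  by_cases hi : i < cs.length
  · by_cases hc : cs[i]! = ';'
    · rw [skipSemi_stop cs i hc]
    · rw [skipSemi_step cs i hi hc]
      have hstep : loopA cs i s false true acc = loopA cs (i + 1) s false true acc := by
        have hc' : ¬ cs[i] = ';' := by rw [← getElem!_pos cs i hi]; exact hc
        conv_lhs => rw [loopA]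
        simp [hi, hc']
      rw [hstep]
      exact loopA_skipSemi cs (i + 1) s acc
  · have he : skipSemi cs i = i := by rw [skipSemi]; simp [hi]
    rw [he]
termination_by cs.length - i
decreasing_by omega

-- At a token boundary the carried start_index is dead: A overwrites it with index.
theorem loopA_boundary (cs : List Char) (i s : Nat) (acc : List String) :
    loopA cs i s true false acc = loopA cs i i false false acc := by
  rw [loopA, loopA]
  by_cases hi : i < cs.length
  · simp [hi]
  · simp [hi]

-- One whole token of A (from a non-ref, mid-token state with fixed start s) in closed form.
theorem loopA_token (cs : List Char) (i s : Nat) (acc : List String) :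
    loopA cs i s false false acc =
      (let j := skipBr cs i
       if j < cs.length then
         let c := cs[j]!
         if c = 'L' then
           let k := skipSemi cs j
           if k < cs.length then
             loopA cs (k + 1) s true false (acc ++ [pvSlice cs s (k + 1)])
           else acc
         else
           loopA cs (j + 1) s true false
             (acc ++ [pvSlice cs s (j + 1)] ++ (if c = 'J' ∨ c = 'D' then [" "] else []))
       else acc) := by
  rw [loopA_skipBr]
  set j := skipBr cs i with hj
  simp only []
  by_cases hjl : j < cs.length
  · have hnb : ¬ cs[j]! = '[' := skipBr_char cs i hjl
    by_cases hL : cs[j]! = 'L'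
    · have hstep : loopA cs j s false false acc = loopA cs (j + 1) s false true acc := by
        have hL' : cs[j] = 'L' := by rw [← getElem!_pos cs j hjl]; exact hL
        conv_lhs => rw [loopA]
        simp [hjl, hL']
      rw [hstep, loopA_skipSemi]
      have hsem : skipSemi cs (j + 1) = skipSemi cs j := by
        rw [skipSemi_step cs j hjl (by rw [hL]; decide)]
      rw [hsem]
      set k := skipSemi cs j with hk
      simp only [hjl, hL, if_true]
      by_cases hkl : k < cs.length
      · have hsc : cs[k] = ';' := by rw [← getElem!_pos cs k hkl]; exact skipSemi_char cs j hkl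
        conv_lhs => rw [loopA]
        simp [hkl, hsc]
      · conv_lhs => rw [loopA]
        simp [hkl]
    · have hL' : ¬ cs[j] = 'L' := by rw [← getElem!_pos cs j hjl]; exact hL
      have hnb' : ¬ cs[j] = '[' := by rw [← getElem!_pos cs j hjl]; exact hnb
      conv_lhs => rw [loopA]
      simp [hjl, hL', hnb']
  · conv_lhs => rw [loopA]
    simp [hjl]

-- Main correspondence: A from a token boundary equals B's outer loop.
theorem loopAB (cs : List Char) (m : Nat) :
    ∀ i s acc, cs.length - i ≤ m → loopA cs i s true false acc = loopB cs i acc := by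
  induction m with
  | zero =>
    intro i s acc h
    have hi : ¬ i < cs.length := by omega
    rw [loopA, loopB]
    simp [hi]
  | succ m ih =>
    intro i s acc h
    by_cases hi : i < cs.length
    · rw [loopA_boundary, loopA_token, loopB]
      simp only [hi, if_true]
      set j := skipBr cs i with hj
      have hji : i ≤ j := skipBr_ge cs i
      by_cases hjl : j < cs.length
      · simp only [hjl, if_true]
        by_cases hL : cs[j]! = 'L'
        · simp only [hL, if_true]
          set k := skipSemi cs j with hk
          have hkj : j ≤ k := skipSemi_ge cs j
          by_cases hkl : k < cs.length
          · simp only [hkl, if_true]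
            exact ih (k + 1) i (acc ++ [pvSlice cs i (k + 1)]) (by omega)
          · simp [hkl]
        · simp only [hL, if_false]
          exact ih (j + 1) i _ (by omega)
      · simp [hjl]
    · rw [loopA, loopB]
      simp [hi]

-- ===== VERDICT (by name: the statement is the Claim_ definition above) =====
theorem get_param_seq_spec : Claim_equal_get_param_seq := by
  intro param_str _
  unfold Spec_get_param_seq get_param_seq get_param_seq_alt
  exact loopAB param_str.toList param_str.toList.length 0 0 [] (by omega)
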